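-- pv_equiv track=rewrite | github.com/The-Good-Penguin/lsudt | lsudt/lsudt.py | are_nodes_missing
-- ===== SOURCE A (Python) =====
-- def are_nodes_missing(envs_to_check : list, env_strings : list) -> bool:
--     """
--     checks the generated env strings if the requested environemnt
--     variable is present
--     """
--
--     # we only care about the envs name
--     stripped_envs = []
--     for e_s in env_strings:
--         stripped = e_s.split("=")[0]
--         stripped_envs.append(stripped)
--
--     if all(i in stripped_envs for i in envs_to_check):
--         # all of the requested envs are present
--         return False
--     else:
--         # we're missing one or more
--         return True
-- ===== SOURCE B (Python) =====
-- def are_nodes_missing(envs_to_check, env_strings):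
--     """
--     checks the generated env strings if the requested environemnt
--     variable is present
--     """
--     needed = set(envs_to_check)
--     for e_s in env_strings:
--         needed.discard(e_s.split("=")[0])
--         if not needed:
--             return False
--     return bool(needed)
-- ===== Notes on version B (the rewrite author's own statement) =====
-- stated objective: alternative
-- what changed: Instead of materialising the list of stripped env names and then testing every requested name against it, B keeps a shrinking set of still-unmatched requested names, discards each scanned env name from it and early-exits once the set is empty.
import Mathlib
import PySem

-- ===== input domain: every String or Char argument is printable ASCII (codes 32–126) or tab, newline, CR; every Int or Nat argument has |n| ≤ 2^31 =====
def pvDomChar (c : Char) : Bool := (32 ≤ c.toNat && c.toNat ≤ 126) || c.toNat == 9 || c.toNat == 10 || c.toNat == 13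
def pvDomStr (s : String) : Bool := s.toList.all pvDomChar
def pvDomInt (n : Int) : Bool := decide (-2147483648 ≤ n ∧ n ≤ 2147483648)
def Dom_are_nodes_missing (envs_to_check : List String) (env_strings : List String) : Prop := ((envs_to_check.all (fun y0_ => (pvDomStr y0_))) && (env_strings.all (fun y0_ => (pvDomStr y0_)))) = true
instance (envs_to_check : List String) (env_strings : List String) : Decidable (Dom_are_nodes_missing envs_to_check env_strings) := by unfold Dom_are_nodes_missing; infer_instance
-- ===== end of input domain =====

-- B replaces "build the list of stripped names, then test each requested name against it"
-- by a single scan of env_strings maintaining the shrinking set of still-unmatched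
-- requested names, with an early exit once it is empty (alternative decomposition).

-- ===== PORT A =====
-- e_s.split("=")[0]: split by a nonempty separator always yields a nonempty list,
-- so headD is exact here.
def are_nodes_missing (envs_to_check : List String) (env_strings : List String) : Bool :=
  let stripped_envs := env_strings.foldl
    (fun acc e_s => acc ++ [((PySem.Str.split? e_s "=").getD []).headD ""]) []
  if envs_to_check.all (fun i => stripped_envs.contains i) then false else true

-- ===== PORT B =====
def pvAltLoop (needed : PySem.Set String) : List String → Bool
  | [] => !needed.isEmpty
  | e_s :: rest =>
    let needed' := PySem.Set.discard needed (((PySem.Str.split? e_s "=").getD []).headD "")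
    if needed'.isEmpty then false else pvAltLoop needed' rest

def are_nodes_missing_alt (envs_to_check : List String) (env_strings : List String) : Bool :=
  pvAltLoop (PySem.Set.ofList envs_to_check) env_strings

-- ===== PRECONDITION & SPEC =====
def Spec_are_nodes_missing (envs_to_check : List String) (env_strings : List String) (out : Bool) : Prop := out = are_nodes_missing_alt envs_to_check env_strings
instance (envs_to_check : List String) (env_strings : List String) (out : Bool) : Decidable (Spec_are_nodes_missing envs_to_check env_strings out) := by unfold Spec_are_nodes_missing; infer_instance

-- ===== CLAIM (what is proved, stated in full; the proofs are below) =====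
def Claim_equal_are_nodes_missing : Prop := ∀ (envs_to_check : List String) (env_strings : List String), Dom_are_nodes_missing envs_to_check env_strings → Spec_are_nodes_missing envs_to_check env_strings (are_nodes_missing envs_to_check env_strings)

-- ===== LEMMAS AND PROOFS =====

def pvName (e_s : String) : String := ((PySem.Str.split? e_s "=").getD []).headD ""

-- the loop of B returns true iff some still-needed name is matched by no remaining env string
theorem pvAltLoop_true_iff (rest : List String) (needed : PySem.Set String) :
    pvAltLoop needed rest = true ↔ ∃ x ∈ needed, x ∉ rest.map pvName := by
  induction rest generalizing needed with
  | nil =>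
    simp only [pvAltLoop, List.map_nil, List.not_mem_nil, not_false_iff, and_true,
      Bool.not_eq_eq_eq_not, Bool.not_true, List.isEmpty_eq_false_iff_exists_mem]
  | cons e rest ih =>
    simp only [pvAltLoop]
    split_ifs with hempty
    · rw [List.isEmpty_iff] at hempty
      simp only [false_iff]
      rintro ⟨x, hx, hnot⟩
      simp only [List.map_cons, List.mem_cons, not_or] at hnot
      have hmem : x ∈ PySem.Set.discard needed (pvName e) :=
        (PySem.Set.mem_discard _ _ _).2 ⟨hx, hnot.1⟩
      rw [show ((PySem.Str.split? e "=").getD []).headD "" = pvName e from rfl] at hempty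
      rw [hempty] at hmem
      exact List.not_mem_nil hmem
    · rw [ih]
      constructor
      · rintro ⟨x, hx, hnot⟩
        rw [PySem.Set.mem_discard] at hx
        refine ⟨x, hx.1, ?_⟩
        simp only [List.map_cons, List.mem_cons, not_or]
        exact ⟨hx.2, hnot⟩
      · rintro ⟨x, hx, hnot⟩
        simp only [List.map_cons, List.mem_cons, not_or] at hnot
        exact ⟨x, (PySem.Set.mem_discard _ _ _).2 ⟨hx, hnot.1⟩, hnot.2⟩

theorem pvStripped_eq_map (env_strings : List String) (acc : List String) :
    env_strings.foldl (fun acc e_s => acc ++ [((PySem.Str.split? e_s "=").getD []).headD ""]) acc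
      = acc ++ env_strings.map pvName := by
  induction env_strings generalizing acc with
  | nil => simp
  | cons e rest ih =>
    rw [List.foldl_cons, ih]
    simp [pvName]

-- ===== VERDICT (by name: the statement is the Claim_ definition above) =====
theorem are_nodes_missing_spec : Claim_equal_are_nodes_missing := by
  intro envs_to_check env_strings _
  unfold Spec_are_nodes_missing are_nodes_missing are_nodes_missing_alt
  rw [pvStripped_eq_map]
  simp only [List.nil_append]
  by_cases h : ∀ x ∈ envs_to_check, x ∈ env_strings.map pvName
  · have hB : pvAltLoop (PySem.Set.ofList envs_to_check) env_strings = false := by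
      rw [Bool.eq_false_iff, Ne, pvAltLoop_true_iff]
      rintro ⟨x, hx, hnot⟩
      exact hnot (h x ((PySem.Set.mem_ofList _ _).1 hx))
    rw [hB, if_pos]
    simp only [List.all_eq_true]
    intro x hx
    simpa using h x hx
  · have hB : pvAltLoop (PySem.Set.ofList envs_to_check) env_strings = true := by
      rw [pvAltLoop_true_iff]
      push Not at h
      rcases h with ⟨x, hx, hnot⟩
      exact ⟨x, (PySem.Set.mem_ofList _ _).2 hx, hnot⟩
    rw [hB, if_neg]
    simp only [List.all_eq_true, not_forall]
    push Not at h
    rcases h with ⟨x, hx, hnot⟩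
    exact ⟨x, hx, by simpa using hnot⟩
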